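-- pv_equiv track=rewrite | github.com/ibgp2/ibgp2 | scripts/gnuplot_convergence.py | make_x2_tics
-- ===== SOURCE A (Python) =====
-- def combin(n, k):
--     # http://python.jpvweb.com/mesrecettespython/doku.php?id=combinaisons
--     if k > n//2:
--         k = n-k
--     x = 1
--     y = 1
--     i = n-k+1
--     while i <= n:
--         x = (x*i)//y
--         y += 1
--         i += 1
--     return x
--
-- def make_x2_tics(num_routers):
--     """
--     Make x2tics according to the number of router.
--     We count how many prefixes was used in during for each
--     run i (from 1 to |T|)
--     Args:
--         num_routers: The number of router in the simulated AS (|T|).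
--     Returns:
--         The strings that can be passed to "set x2tics" in gnuplot.
--     """
--     s = '('
--     for i in range(1, num_routers + 1):
--         s += "\"%d\" %d%s" % (
--             combin(num_routers, i),
--             i,
--             "," if i < num_routers else ""
--         )
--     s += ')'
--     return s
-- ===== SOURCE B (Python) =====
-- def make_x2_tics(num_routers):
--     parts = []
--     c = 1
--     for i in range(1, num_routers + 1):
--         c = c * (num_routers - i + 1) // i
--         parts.append('"%d" %d' % (c, i))
--     return '(' + ','.join(parts) + ')'
-- ===== Notes on version B (the rewrite author's own statement) =====
-- stated objective: faster
-- what changed: B replaces the per-tic call to combin (an inner O(i) product/division loop, O(n^2) overall) with the single-pass multiplicative recurrence C(n,i) = C(n,i-1)*(n-i+1)//i carried across the loop, and assembles the string with ','.join instead of conditional comma suffixes.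
import Mathlib
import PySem

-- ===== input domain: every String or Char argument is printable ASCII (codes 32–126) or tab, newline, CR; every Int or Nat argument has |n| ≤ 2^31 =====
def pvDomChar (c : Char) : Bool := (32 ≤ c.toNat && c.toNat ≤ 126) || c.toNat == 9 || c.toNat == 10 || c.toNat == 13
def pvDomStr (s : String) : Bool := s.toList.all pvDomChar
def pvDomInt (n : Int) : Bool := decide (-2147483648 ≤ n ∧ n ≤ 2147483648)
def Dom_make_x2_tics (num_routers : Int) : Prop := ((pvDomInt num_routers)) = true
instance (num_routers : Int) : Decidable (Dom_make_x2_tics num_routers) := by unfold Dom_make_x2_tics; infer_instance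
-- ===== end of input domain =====

-- B replaces A's per-tic combin call (an inner loop) by the one-pass multiplicative
-- recurrence C(n,i) = C(n,i-1)*(n-i+1)//i and joins the pieces with ','.join.

-- ===== PORT A =====
-- while i <= n: x = (x*i)//y; y += 1; i += 1
def combinLoop (n x y i : Int) : Int :=
  if i ≤ n then combinLoop n (PySem.Int.floordiv (x * i) y) (y + 1) (i + 1) else x
termination_by (n + 1 - i).toNat
decreasing_by omega

-- if k > n//2: k = n-k, then the while loop from i = n-k+1
def combin (n k : Int) : Int :=
  combinLoop n 1 1 (n - (if PySem.Int.floordiv n 2 < k then n - k else k) + 1)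

def make_x2_tics (num_routers : Int) : String :=
  ((PySem.List.pyRange 1 (num_routers + 1) 1).foldl
    (fun s i =>
      s ++ ("\"" ++ PySem.Int.toStr (combin num_routers i) ++ "\" " ++ PySem.Int.toStr i
        ++ (if i < num_routers then "," else ""))) "(") ++ ")"

-- ===== PORT B =====
def make_x2_tics_alt (num_routers : Int) : String :=
  "(" ++ PySem.Str.join ","
    ((PySem.List.pyRange 1 (num_routers + 1) 1).foldl
      (fun (st : List String × Int) i =>
        let c := PySem.Int.floordiv (st.2 * (num_routers - i + 1)) i
        (st.1 ++ ["\"" ++ PySem.Int.toStr c ++ "\" " ++ PySem.Int.toStr i], c))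
      ([], 1)).1 ++ ")"

-- ===== PRECONDITION & SPEC =====
def Spec_make_x2_tics (num_routers : Int) (out : String) : Prop := out = make_x2_tics_alt num_routers
instance (num_routers : Int) (out : String) : Decidable (Spec_make_x2_tics num_routers out) := by unfold Spec_make_x2_tics; infer_instance

-- ===== CLAIM (what is proved, stated in full; the proofs are below) =====
def Claim_equal_make_x2_tics : Prop := ∀ (num_routers : Int), Dom_make_x2_tics num_routers → Spec_make_x2_tics num_routers (make_x2_tics num_routers)

-- ===== LEMMAS AND PROOFS =====

-- the comma-free tic piece for index i, with the true binomial coefficient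
def pvPiece (N : Nat) (i : Int) : String :=
  "\"" ++ PySem.Int.toStr (Nat.choose N i.toNat) ++ "\" " ++ PySem.Int.toStr i

theorem pv_fdiv_exact (m k : Nat) (hk : 0 < k) :
    PySem.Int.floordiv ((m * k : Nat) : Int) ((k : Nat) : Int) = (m : Int) := by
  unfold PySem.Int.floordiv
  push_cast
  exact Int.mul_fdiv_cancel _ (by omega)

theorem combinLoop_inv (N K : Nat) (hK : K ≤ N) :
    ∀ (d t : Nat), K = t + d →
      combinLoop (N : Int) ((Nat.choose (N - K + t) t : Nat) : Int) ((t : Int) + 1)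
        ((N : Int) - (K : Int) + (t : Int) + 1) = ((Nat.choose N K : Nat) : Int) := by
  intro d
  induction d with
  | zero =>
      intro t ht
      rw [combinLoop, if_neg (by omega)]
      have h1 : N - K + t = N := by omega
      have h2 : t = K := by omega
      rw [h1, h2]
  | succ d ih =>
      intro t ht
      rw [combinLoop, if_pos (by omega)]
      have hx : PySem.Int.floordiv
          (((Nat.choose (N - K + t) t : Nat) : Int) * ((N : Int) - (K : Int) + (t : Int) + 1))
          ((t : Int) + 1)
          = ((Nat.choose (N - K + t + 1) (t + 1) : Nat) : Int) := by
        have hmul : Nat.choose (N - K + t) t * (N - K + t + 1)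
            = Nat.choose (N - K + t + 1) (t + 1) * (t + 1) := by
          have h := Nat.add_one_mul_choose_eq (N - K + t) t
          simpa [Nat.succ_eq_add_one, mul_comm] using h
        have hn1 : ((N - K + t + 1 : Nat) : Int) = (N : Int) - (K : Int) + (t : Int) + 1 := by omega
        have hcast : ((Nat.choose (N - K + t) t : Nat) : Int) * ((N : Int) - (K : Int) + (t : Int) + 1)
            = ((Nat.choose (N - K + t + 1) (t + 1) * (t + 1) : Nat) : Int) := by
          rw [← hn1, ← Nat.cast_mul, hmul]
        rw [hcast]
        have e : ((t : Nat) : Int) + 1 = (((t + 1 : Nat)) : Int) := by push_cast; ring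
        rw [e]
        exact pv_fdiv_exact _ _ (by omega)
      rw [hx]
      have e3 : N - K + (t + 1) = N - K + t + 1 := by omega
      have h2 := ih (t + 1) (by omega)
      rw [e3] at h2
      push_cast at h2 ⊢
      convert h2 using 2; ring

theorem combin_eq (n k : Int) (h1 : 1 ≤ k) (h2 : k ≤ n) :
    combin n k = ((Nat.choose n.toNat k.toNat : Nat) : Int) := by
  have hn : ((n.toNat : Nat) : Int) = n := by omega
  unfold combin
  by_cases hc : PySem.Int.floordiv n 2 < k
  · rw [if_pos hc]
    have hK' : (n - k).toNat ≤ n.toNat := by omega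
    have h := combinLoop_inv n.toNat (n - k).toNat hK' (n - k).toNat 0 (by omega)
    have e0 : n.toNat - (n - k).toNat + 0 = n.toNat - (n - k).toNat := by omega
    have e1 : (((n - k).toNat : Nat) : Int) = n - k := by omega
    rw [Nat.choose_zero_right] at h
    have e2 : ((n.toNat : Nat) : Int) - (((n - k).toNat : Nat) : Int) + ((0 : Nat) : Int) + 1
        = n - (n - k) + 1 := by omega
    rw [e2, hn] at h
    simp only [Nat.cast_one, Nat.cast_zero, zero_add] at h
    rw [h]
    have e3 : (n - k).toNat = n.toNat - k.toNat := by omega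
    rw [e3, Nat.choose_symm (show k.toNat ≤ n.toNat by omega)]
  · rw [if_neg hc]
    have hK : k.toNat ≤ n.toNat := by omega
    have h := combinLoop_inv n.toNat k.toNat hK k.toNat 0 (by omega)
    rw [Nat.choose_zero_right] at h
    have e2 : ((n.toNat : Nat) : Int) - ((k.toNat : Nat) : Int) + ((0 : Nat) : Int) + 1
        = n - k + 1 := by omega
    rw [e2, hn] at h
    simp only [Nat.cast_one, Nat.cast_zero, zero_add] at h
    exact h

theorem foldl_str_append (g : Int → String) :
    ∀ (l : List Int) (s : String),
      l.foldl (fun s i => s ++ g i) s = s ++ (l.map g).foldr (· ++ ·) "" := by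
  intro l
  induction l with
  | nil => intro s; simp
  | cons a l ih =>
      intro s
      simp only [List.foldl_cons, List.map_cons, List.foldr_cons, ih]
      rw [String.append_assoc]

theorem B_loop (n : Int) (N : Nat) (hN : (N : Int) = n) :
    ∀ (d a : Nat), N + 1 = a + d → 1 ≤ a → ∀ (parts : List String),
      (PySem.List.pyRange (a : Int) (n + 1) 1).foldl
        (fun (st : List String × Int) i =>
          let c := PySem.Int.floordiv (st.2 * (n - i + 1)) i
          (st.1 ++ ["\"" ++ PySem.Int.toStr c ++ "\" " ++ PySem.Int.toStr i], c))
        (parts, ((Nat.choose N (a - 1) : Nat) : Int))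
      = (parts ++ (PySem.List.pyRange (a : Int) (n + 1) 1).map (pvPiece N),
         ((Nat.choose N N : Nat) : Int)) := by
  intro d
  induction d with
  | zero =>
      intro a hd ha parts
      rw [PySem.List.pyRange_one_eq_nil (by omega)]
      simp only [List.foldl_nil, List.map_nil, List.append_nil]
      have : a - 1 = N := by omega
      rw [this]
  | succ d ih =>
      intro a hd ha parts
      rw [PySem.List.pyRange_one_cons (by omega)]
      simp only [List.foldl_cons, List.map_cons]
      have hstep : PySem.Int.floordiv (((Nat.choose N (a - 1) : Nat) : Int) * (n - (a : Int) + 1)) (a : Int)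
          = ((Nat.choose N a : Nat) : Int) := by
        have hmul : Nat.choose N (a - 1) * (N - (a - 1)) = Nat.choose N a * a := by
          have h := Nat.choose_succ_right_eq N (a - 1)
          have e : a - 1 + 1 = a := by omega
          rw [e] at h
          omega
        have e1 : n - (a : Int) + 1 = ((N - (a - 1) : Nat) : Int) := by omega
        rw [e1, ← Nat.cast_mul, hmul]
        exact pv_fdiv_exact _ _ (by omega)
      rw [hstep]
      have h2 := ih (a + 1) (by omega) (by omega) (parts ++ ["\"" ++ PySem.Int.toStr ((Nat.choose N a : Nat) : Int) ++ "\" " ++ PySem.Int.toStr (a : Int)])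
      have e2 : (a + 1 : Nat) - 1 = a := by omega
      rw [e2] at h2
      push_cast at h2 ⊢
      rw [h2]
      simp only [List.append_assoc, List.singleton_append]
      have : pvPiece N (a : Int) = "\"" ++ PySem.Int.toStr ((Nat.choose N a : Nat) : Int) ++ "\" " ++ PySem.Int.toStr (a : Int) := by
        simp [pvPiece]
      rw [this]

theorem scat_comma_eq_join (g : Int → String) (n : Int) :
    ∀ (d a : Nat), n + 1 = (a : Int) + (d : Int) → 1 ≤ a →
      ((PySem.List.pyRange (a : Int) (n + 1) 1).map
          (fun i => g i ++ (if i < n then "," else ""))).foldr (· ++ ·) ""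
        = PySem.Str.join "," ((PySem.List.pyRange (a : Int) (n + 1) 1).map g) := by
  intro d
  induction d with
  | zero =>
      intro a hd ha
      rw [PySem.List.pyRange_one_eq_nil (by omega)]
      apply String.ext
      simp [PySem.Str.toList_join, PySem.Chars.join_nil]
  | succ d ih =>
      intro a hd ha
      rcases d with _ | d
      · -- a = n : single last element, no comma
        have hrange : PySem.List.pyRange (a : Int) (n + 1) 1 = [(a : Int)] := by
          rw [PySem.List.pyRange_one_cons (by omega), PySem.List.pyRange_one_eq_nil (by omega)]
        rw [hrange]
        apply String.ext
        have hlt : ¬ ((a : Int) < n) := by omega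
        simp [hlt, PySem.Str.toList_join, PySem.Chars.join_singleton]
      · -- a < n : comma case
        have hlt : ((a : Int) < n) := by omega
        have hne : PySem.List.pyRange ((a : Int) + 1) (n + 1) 1 =
            ((a : Int) + 1) :: PySem.List.pyRange ((a : Int) + 1 + 1) (n + 1) 1 := by
          exact PySem.List.pyRange_one_cons (by omega)
        have ihh := ih (a + 1) (by push_cast; omega) (by omega)
        push_cast at ihh
        rw [PySem.List.pyRange_one_cons (show (a : Int) < n + 1 by omega)]
        simp only [List.map_cons, List.foldr_cons]
        rw [ihh]
        apply String.ext
        rw [hne]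
        simp only [List.map_cons, PySem.Str.toList_join, PySem.Chars.join_cons_cons,
          String.toList_append, if_pos hlt, List.map_cons]

theorem make_x2_tics_eq_alt (n : Int) : make_x2_tics n = make_x2_tics_alt n := by
  by_cases hn : n + 1 ≤ 1
  · unfold make_x2_tics make_x2_tics_alt
    rw [PySem.List.pyRange_one_eq_nil hn]
    apply String.ext
    simp [PySem.Str.toList_join, PySem.Chars.join_nil]
  · rw [not_le] at hn
    set N := n.toNat with hNdef
    have hN : (N : Int) = n := by omega
    unfold make_x2_tics make_x2_tics_alt
    rw [foldl_str_append]
    have hmap : (PySem.List.pyRange 1 (n + 1) 1).map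
        (fun i => "\"" ++ PySem.Int.toStr (combin n i) ++ "\" " ++ PySem.Int.toStr i
          ++ (if i < n then "," else ""))
        = (PySem.List.pyRange 1 (n + 1) 1).map (fun i => pvPiece N i ++ (if i < n then "," else "")) := by
      apply List.map_congr_left
      intro i hi
      rw [PySem.List.mem_pyRange_one] at hi
      rw [combin_eq n i hi.1 (by omega)]
      apply String.ext
      simp [pvPiece, String.toList_append, List.append_assoc, hNdef]
    rw [hmap]
    have hscat := scat_comma_eq_join (pvPiece N) n N 1 (by push_cast; omega) (le_refl 1)
    push_cast at hscat
    rw [hscat]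
    have hB := B_loop n N hN N 1 (by omega) (le_refl 1) []
    push_cast at hB
    simp only [Nat.choose_zero_right, Nat.cast_one] at hB
    rw [hB]
    rw [List.nil_append]

-- ===== VERDICT (by name: the statement is the Claim_ definition above) =====
theorem make_x2_tics_spec : Claim_equal_make_x2_tics := by
  intro n _
  exact make_x2_tics_eq_alt n
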